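-- pv_equiv track=rewrite | github.com/jenzopr/pydemult | pydemult/mutationhash.py | mutationhash
-- ===== SOURCE A (Python) =====
-- import itertools
--
-- def mutationhash(strings, nedit, alphabet = ["A", "C", "G", "T"], log = None):
--     """
--     produce a hash with each key a nedit distance substitution for a set of
--     strings. values of the hash is the set of strings the substitution could
--     have come from
--     """
--     maxlen = max([len(string) for string in strings])
--     indexes = generate_idx(maxlen, nedit, alphabet = alphabet)
--     muthash = dict()
--     for string in strings:
--         if string not in muthash:
--             if log is not None:
--                 log.debug("Added {} -> {} to mutationhash".format(string, string))
--             muthash[string] = {string}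
--         for x in substitution_set(string, indexes):
--             if x not in muthash:
--                 muthash[x] = {string}
--                 if log is not None:
--                     log.debug("Added {} -> {} to mutationhash ".format(x, string))
--             else:
--                 muthash[x].add(string)
--                 if log is not None:
--                     log.debug("Added {} -> {} to mutationhash ".format(x, string))
--     return muthash
--
-- def substitution_set(string, indexes):
--     """
--     for a string, return a set of all possible substitutions
--     """
--     strlen = len(string)
--     return [mutate_string(string, x) for x in indexes if valid_substitution(strlen, x)]
--
-- def valid_substitution(strlen, index):
--     """
--     skip performing substitutions that are outside the bounds of the string
--     """
--     values = index[0]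
--     return all([strlen > i for i in values])
--
-- def generate_idx(maxlen, nedit, alphabet = ["A", "C", "G", "T"]):
--     """
--     generate all possible nedit edits of a string. each item has the form
--     ((index1, index2), 'A', 'G')  for nedit=2
--     index1 will be replaced by 'A', index2 by 'G'
--
--     this covers all edits < nedit as well since some of the specified
--     substitutions will not change the base
--     """
--     indexlists = []
--     ALPHABETS = [alphabet for x in range(nedit)]
--     return list(itertools.product(itertools.combinations(range(maxlen), nedit),
--                                   *ALPHABETS))
--
-- def mutate_string(string, tomutate):
--     strlist = list(string)
--     for i, idx in enumerate(tomutate[0]):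
--         strlist[idx] = tomutate[i+1]
--     return "".join(strlist)
-- ===== SOURCE B (Python) =====
-- import itertools
--
-- def mutationhash(strings, nedit, alphabet = ["A", "C", "G", "T"], log = None):
--     """
--     Same result as the original, but without the global precomputed index table:
--     mutations are enumerated directly per string (positions from the string's own
--     length, so no validity filter), and each mutated string is built by a lookup
--     comprehension instead of copy-and-overwrite.
--     """
--     muthash = dict()
--     for string in strings:
--         if string not in muthash:
--             if log is not None:
--                 log.debug("Added {} -> {} to mutationhash".format(string, string))
--             muthash[string] = {string}
--         for positions in itertools.combinations(range(len(string)), nedit):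
--             for letters in itertools.product(alphabet, repeat=nedit):
--                 repl = dict(zip(positions, letters))
--                 x = "".join(repl.get(i, ch) for i, ch in enumerate(string))
--                 muthash.setdefault(x, set()).add(string)
--                 if log is not None:
--                     log.debug("Added {} -> {} to mutationhash ".format(x, string))
--     return muthash
-- ===== Notes on version B (the rewrite author's own statement) =====
-- stated objective: simpler
-- what changed: B drops A's precompute-then-filter structure (the global generate_idx table over the maximum string length, valid_substitution filtering and copy-and-overwrite mutate_string helper) and instead enumerates mutations directly per string from its own length, building each mutated string with a position->letter dict lookup comprehension and inserting via setdefault.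
import Mathlib
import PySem

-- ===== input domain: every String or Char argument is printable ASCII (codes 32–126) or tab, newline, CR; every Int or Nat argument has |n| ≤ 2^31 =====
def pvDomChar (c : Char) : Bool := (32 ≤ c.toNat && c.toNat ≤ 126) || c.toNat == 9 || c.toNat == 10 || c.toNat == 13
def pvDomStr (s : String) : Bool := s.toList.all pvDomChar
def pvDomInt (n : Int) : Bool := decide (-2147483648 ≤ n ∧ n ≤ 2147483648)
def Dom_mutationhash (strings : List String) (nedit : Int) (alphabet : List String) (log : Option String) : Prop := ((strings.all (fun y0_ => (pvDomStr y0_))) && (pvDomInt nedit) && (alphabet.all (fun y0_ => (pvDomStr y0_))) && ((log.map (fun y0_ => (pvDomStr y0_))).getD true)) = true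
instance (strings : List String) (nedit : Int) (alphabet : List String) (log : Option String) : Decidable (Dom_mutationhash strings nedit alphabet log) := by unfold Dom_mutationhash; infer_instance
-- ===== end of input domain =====

-- B drops A's global precomputed index table (generate_idx over the maximum length plus a
-- per-string validity filter) in favour of direct per-string enumeration of the positions,
-- and builds each mutated string by a lookup comprehension instead of copy-and-overwrite;
-- objective: simpler. Equivalence is about the return value; 'log' must be None (Pre_).

-- ===== PORT A =====

-- itertools.combinations(xs, r): lexicographic combinations of elements of xs in order
-- (exact for the duplicate-free range(...) lists both programs apply it to)
def pvCombos : Nat → List Int → List (List Int)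
  | 0, _ => [[]]
  | _+1, [] => []
  | r+1, x :: xs =>
    -- itertools.combinations returns no tuples at all when r exceeds len(pool);
    -- this early exit (part of the library routine's behaviour) keeps the
    -- recursion from exploring an empty search space
    if xs.length < r then []
    else ((pvCombos r xs).map (fun c => x :: c)) ++ pvCombos (r+1) xs

-- itertools.product(alphabet, repeat = n)
def pvTuples (alphabet : List String) : Nat → List (List String)
  | 0 => [[]]
  | n+1 => alphabet.flatMap (fun a => (pvTuples alphabet n).map (fun t => a :: t))

-- generate_idx: list(itertools.product(itertools.combinations(range(maxlen), nedit), *ALPHABETS))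
def pvGenerateIdx (maxlen : Nat) (nedit : Nat) (alphabet : List String) : List (List Int × List String) :=
  (pvCombos nedit (PySem.List.pyRange 0 maxlen)).flatMap
    (fun c => (pvTuples alphabet nedit).map (fun t => (c, t)))

-- mutate_string: strlist = list(string); for i, idx in enumerate(tomutate[0]): strlist[idx] = tomutate[i+1]
def pvMutateString (s : String) (x : List Int × List String) : String :=
  PySem.Str.join "" ((x.1.zip x.2).foldl (fun acc p => PySem.List.pySetD acc p.1 p.2)
    (s.toList.map (fun ch => String.ofList [ch])))

-- valid_substitution strlen index
def pvValidSubstitution (strlen : Int) (x : List Int × List String) : Bool :=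
  x.1.all (fun i => decide (strlen > i))

-- substitution_set: [mutate_string(string, x) for x in indexes if valid_substitution(strlen, x)]
def pvSubstitutionSet (s : String) (indexes : List (List Int × List String)) : List String :=
  (indexes.filter (pvValidSubstitution (s.toList.length : Int))).map (pvMutateString s)

def mutationhash (strings : List String) (nedit : Int) (alphabet : List String) (log : Option String) : List (String × List String) :=
  -- log is only ever used via log.debug, which raises on the str values admitted here; Pre_ demands log = none
  let maxlen : Nat := ((PySem.List.max? (strings.map (fun s => s.toList.length)) (fun x => x)).getD 0)
  let indexes := pvGenerateIdx maxlen nedit.toNat alphabet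
  (strings.foldl (fun d s =>
      let d := if d.contains s then d else d.insert s (PySem.Set.ofList [s])
      (pvSubstitutionSet s indexes).foldl (fun d x =>
        if d.contains x = false then d.insert x (PySem.Set.ofList [s])
        else d.modify x PySem.Set.empty (fun v => PySem.Set.add v s)) d)
    PySem.Dict.empty).items

-- ===== PORT B =====

-- x = "".join(repl.get(i, ch) for i, ch in enumerate(string)), repl = dict(zip(positions, letters))
def pvMutLookup (cs : List Char) (positions : List Int) (letters : List String) : String :=
  let repl := PySem.Dict.ofList (positions.zip letters)
  PySem.Str.join "" ((PySem.List.enumerate cs).map (fun p => repl.getD p.1 (String.ofList [p.2])))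

def mutationhash_alt (strings : List String) (nedit : Int) (alphabet : List String) (log : Option String) : List (String × List String) :=
  -- log is only ever used via log.debug, which raises on the str values admitted here; Pre_ demands log = none
  (strings.foldl (fun d s =>
      let cs := s.toList
      let d := if d.contains s then d else d.insert s (PySem.Set.ofList [s])
      (pvCombos nedit.toNat (PySem.List.pyRange 0 cs.length)).foldl (fun d positions =>
        (pvTuples alphabet nedit.toNat).foldl (fun d letters =>
          -- muthash.setdefault(x, set()).add(string)  =  d[x] = d.get(x, set()).add(string)
          d.modify (pvMutLookup cs positions letters) PySem.Set.empty (fun v => PySem.Set.add v s)) d) d)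
    PySem.Dict.empty).items

-- ===== PRECONDITION & SPEC =====
-- Pre_ excludes exactly the inputs where A raises: strings = [] (ValueError from max of an
-- empty list), nedit < 0 (ValueError from itertools.combinations), and log ≠ None (an
-- AttributeError, since the admitted str values have no .debug method).
def Pre_mutationhash (strings : List String) (nedit : Int) (alphabet : List String) (log : Option String) : Prop :=
  strings ≠ [] ∧ 0 ≤ nedit ∧ log = none
instance (strings : List String) (nedit : Int) (alphabet : List String) (log : Option String) : Decidable (Pre_mutationhash strings nedit alphabet log) := by unfold Pre_mutationhash; infer_instance

def pvWitness_mutationhash : List String × Int × List String × Option String :=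
  (["AC"], 1, ["A", "C"], none)


def Spec_mutationhash (strings : List String) (nedit : Int) (alphabet : List String) (log : Option String) (out : List (String × List String)) : Prop := out = mutationhash_alt strings nedit alphabet log
instance (strings : List String) (nedit : Int) (alphabet : List String) (log : Option String) (out : List (String × List String)) : Decidable (Spec_mutationhash strings nedit alphabet log out) := by unfold Spec_mutationhash; infer_instance

-- ===== CLAIM (what is proved, stated in full; the proofs are below) =====
def Claim_equal_mutationhash : Prop := ∀ (strings : List String) (nedit : Int) (alphabet : List String) (log : Option String), Dom_mutationhash strings nedit alphabet log → Pre_mutationhash strings nedit alphabet log → Spec_mutationhash strings nedit alphabet log (mutationhash strings nedit alphabet log)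

-- ===== LEMMAS AND PROOFS =====

theorem pvCombos_nil_of_lt : ∀ {r : Nat} {l : List Int}, l.length < r → pvCombos r l = [] := by
  intro r l
  induction l generalizing r with
  | nil => intro h; cases r with
    | zero => simp at h
    | succ r => rfl
  | cons x xs ih =>
    intro h
    cases r with
    | zero => simp at h
    | succ r =>
      simp only [pvCombos]
      rw [if_pos (by simp at h; omega)]

theorem pvCombos_mem {r : Nat} {l : List Int} {c : List Int} (h : c ∈ pvCombos r l) :
    c.Sublist l ∧ c.length = r := by
  induction l generalizing r c with
  | nil =>
    cases r with
    | zero => simp [pvCombos] at h; simp [h]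
    | succ r => simp [pvCombos] at h
  | cons x xs ih =>
    cases r with
    | zero => simp [pvCombos] at h; simp [h]
    | succ r =>
      simp only [pvCombos] at h
      split at h
      · simp at h
      simp only [List.mem_append, List.mem_map] at h
      rcases h with ⟨c', hc', rfl⟩ | h
      · obtain ⟨h1, h2⟩ := ih hc'
        exact ⟨List.Sublist.cons₂ x h1, by simp [h2]⟩
      · obtain ⟨h1, h2⟩ := ih h
        exact ⟨h1.cons x, h2⟩

theorem pvTuples_mem {alphabet : List String} {n : Nat} {t : List String}
    (h : t ∈ pvTuples alphabet n) : t.length = n := by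
  induction n generalizing t with
  | zero => simp [pvTuples] at h; simp [h]
  | succ n ih =>
    simp only [pvTuples, List.mem_flatMap, List.mem_map] at h
    obtain ⟨a, _, t', ht', rfl⟩ := h
    simp [ih ht']

theorem pvCombos_filter_all {p : Int → Bool} : ∀ (xs ys : List Int) (r : Nat),
    (∀ a ∈ xs, p a = true) → (∀ a ∈ ys, p a = false) →
    (pvCombos r (xs ++ ys)).filter (fun c => c.all p) = pvCombos r xs := by
  intro xs
  induction xs with
  | nil =>
    intro ys r _ hys
    cases r with
    | zero => simp [pvCombos]
    | succ r =>
      simp only [List.nil_append, pvCombos]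
      rw [List.filter_eq_nil_iff.mpr]
      intro c hc
      obtain ⟨hsub, hlen⟩ := pvCombos_mem hc
      cases c with
      | nil => simp at hlen
      | cons a c' =>
        have ha : a ∈ ys := hsub.subset (by simp)
        simp [List.all_cons, hys a ha]
  | cons x xs ih =>
    intro ys r hxs hys
    cases r with
    | zero => simp [pvCombos]
    | succ r =>
      have h1 : ∀ a ∈ xs, p a = true := fun a ha => hxs a (by simp [ha])
      have hx : p x = true := hxs x (by simp)
      simp only [List.cons_append, pvCombos]
      by_cases hbig : (xs ++ ys).length < r
      · rw [if_pos hbig, if_pos (by simp at hbig ⊢; omega)]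
        rfl
      rw [if_neg hbig]
      simp only [List.filter_append, List.filter_map]
      rw [show ((fun c => c.all p) ∘ fun c => x :: c) = fun c => c.all p by
          funext c; simp [List.all_cons, hx]]
      rw [ih ys r h1 hys, ih ys (r+1) h1 hys]
      by_cases hxl : xs.length < r
      · rw [if_pos hxl, pvCombos_nil_of_lt hxl, pvCombos_nil_of_lt (by omega)]
        rfl
      · rw [if_neg hxl]

theorem pv_enum_length {α : Type} (xs : List α) (s : Int) :
    (PySem.List.enumerate xs s).length = xs.length := by
  induction xs generalizing s with
  | nil => simp [PySem.List.enumerate]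
  | cons x xs ih => simp [PySem.List.enumerate, ih]

theorem pv_enum_getElem {α : Type} (xs : List α) (s : Int) (j : Nat) (hj : j < xs.length) :
    (PySem.List.enumerate xs s)[j]'(by rw [pv_enum_length]; exact hj) = (s + j, xs[j]) := by
  induction xs generalizing s j with
  | nil => simp at hj
  | cons x xs ih =>
    cases j with
    | zero => simp [PySem.List.enumerate]
    | succ j =>
      simp only [PySem.List.enumerate, List.getElem_cons_succ]
      rw [ih (s+1) j (by simpa using hj)]
      have : s + 1 + (j:Int) = s + ((j:Nat)+1 : Nat) := by push_cast; ring
      rw [this]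

theorem pv_enum_map {α β : Type} (f : α → β) (xs : List α) (s : Int) :
    PySem.List.enumerate (xs.map f) s = (PySem.List.enumerate xs s).map (fun p => (p.1, f p.2)) := by
  induction xs generalizing s with
  | nil => simp [PySem.List.enumerate]
  | cons x xs ih => simp [PySem.List.enumerate, ih]

theorem pv_items_ofList {ps : List (Int × String)} (hnd : (ps.map Prod.fst).Nodup) :
    (PySem.Dict.ofList ps).items = ps := by
  have h := PySem.Dict.items_foldl_insert_fresh (κ := Int) (ν := String) ps Prod.fst Prod.snd
    PySem.Dict.empty (by intro a _; simp [PySem.Dict.contains, PySem.Dict.empty]) hnd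
  simpa [PySem.Dict.ofList, PySem.Dict.update, PySem.Dict.empty] using h

theorem pv_getD_ofList {ps : List (Int × String)} (hnd : (ps.map Prod.fst).Nodup)
    (k : Int) (d0 : String) :
    (PySem.Dict.ofList ps).getD k d0 = ((ps.find? (fun p => p.1 == k)).map Prod.snd).getD d0 := by
  simp [PySem.Dict.getD, PySem.Dict.get?, pv_items_ofList hnd]


theorem pv_foldl_set_eq_enum : ∀ (ps : List (Int × String)) (init : List String),
    (ps.map Prod.fst).Nodup → (∀ q ∈ ps, 0 ≤ q.1 ∧ q.1 < (init.length : Int)) →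
    ps.foldl (fun acc p => PySem.List.pySetD acc p.1 p.2) init
      = (PySem.List.enumerate init).map (fun q => (PySem.Dict.ofList ps).getD q.1 q.2) := by
  intro ps
  induction ps with
  | nil =>
    intro init _ _
    have : (fun q : Int × String => (PySem.Dict.ofList ([] : List (Int × String))).getD q.1 q.2)
        = Prod.snd := by
      funext q; simp [PySem.Dict.ofList, PySem.Dict.update, PySem.Dict.getD, PySem.Dict.get?,
        PySem.Dict.empty]
    simp [this]
  | cons kv rest ih =>
    intro init hnd hbd
    obtain ⟨k, v⟩ := kv
    simp only [List.map_cons, List.nodup_cons] at hnd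
    obtain ⟨hk_notin, hnd'⟩ := hnd
    have hk0 : 0 ≤ k ∧ k < (init.length : Int) := hbd (k, v) (by simp)
    simp only [List.foldl_cons]
    rw [PySem.List.pySetD_of_nonneg init v hk0.1]
    rw [ih (init.set k.toNat v) hnd' (by simpa using fun q hq => hbd q (by simp [hq]))]
    apply List.ext_getElem
    · simp
    · intro j hj1 hj2
      simp only [List.getElem_map]
      have hjlen : j < (init.set k.toNat v).length := by simpa using hj1
      have hjlen' : j < init.length := by simpa using hjlen
      rw [pv_enum_getElem _ 0 j hjlen, pv_enum_getElem _ 0 j hjlen']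
      simp only [zero_add]
      rw [pv_getD_ofList hnd', pv_getD_ofList (by simp [List.nodup_cons, hk_notin, hnd'])]
      by_cases hk : k = (j : Int)
      · have hjk : j = k.toNat := by omega
        have hfind : rest.find? (fun p => p.1 == (j : Int)) = none := by
          rw [List.find?_eq_none]
          intro p hp
          simp only [beq_iff_eq]
          intro hpe
          exact hk_notin (by rw [hk, ← hpe]; exact List.mem_map_of_mem hp)
        have hcons : List.find? (fun p => p.1 == (j : Int)) ((k, v) :: rest) = some (k, v) :=
          List.find?_cons_of_pos (by simpa using hk)
        rw [hcons, hfind]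
        subst hjk
        simp [List.getElem_set_self]
      · have hjk : k.toNat ≠ j := by omega
        have hcons : List.find? (fun p => p.1 == (j : Int)) ((k, v) :: rest)
            = List.find? (fun p => p.1 == (j : Int)) rest :=
          List.find?_cons_of_neg (by simpa using hk)
        rw [hcons, List.getElem_set_ne hjk]






theorem pv_mutate_eq (s : String) (c : List Int) (t : List String)
    (hlen : c.length = t.length) (hnd : c.Nodup)
    (hbd : ∀ i ∈ c, 0 ≤ i ∧ i < (s.toList.length : Int)) :
    pvMutateString s (c, t) = pvMutLookup s.toList c t := by
  have hfst : (c.zip t).map Prod.fst = c := List.map_fst_zip (le_of_eq hlen)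
  unfold pvMutateString pvMutLookup
  rw [pv_foldl_set_eq_enum (c.zip t) (s.toList.map (fun ch => String.ofList [ch]))
    (by rw [hfst]; exact hnd)
    (by intro q hq
        have hq1 : q.1 ∈ c := by
          rw [← hfst]; exact List.mem_map_of_mem hq
        simpa using hbd q.1 hq1)]
  rw [pv_enum_map]
  rw [List.map_map]
  rfl

theorem pv_flatMap_if {α β : Type} (l : List α) (q : α → Bool) (g : α → List β) :
    (l.flatMap (fun c => if q c then g c else [])) = (l.filter q).flatMap g := by
  induction l with
  | nil => rfl
  | cons x xs ih =>
    by_cases h : q x <;> simp [h, ih]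

theorem pv_filter_idx (L maxlen n : Nat) (hL : L ≤ maxlen) (alphabet : List String) :
    (pvGenerateIdx maxlen n alphabet).filter (pvValidSubstitution (L : Int))
      = (pvCombos n (PySem.List.pyRange 0 L)).flatMap
          (fun c => (pvTuples alphabet n).map (fun t => (c, t))) := by
  unfold pvGenerateIdx
  rw [List.filter_flatMap]
  have hsplit : PySem.List.pyRange 0 (maxlen : Int)
      = PySem.List.pyRange 0 (L : Int) ++ PySem.List.pyRange (L : Int) (maxlen : Int) :=
    PySem.List.pyRange_one_append 0 L maxlen (by omega) (by omega)
  have hinner : ∀ c : List Int,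
      ((pvTuples alphabet n).map (fun t => (c, t))).filter (pvValidSubstitution (L : Int))
        = if c.all (fun i => decide ((L : Int) > i)) then (pvTuples alphabet n).map (fun t => (c, t)) else [] := by
    intro c
    rw [List.filter_map]
    by_cases h : c.all (fun i => decide ((L : Int) > i))
    · simp [Function.comp, pvValidSubstitution, h, List.filter_eq_self.mpr]
    · simp [Function.comp, pvValidSubstitution, h]
  rw [List.flatMap_congr (fun c _ => hinner c)]
  rw [pv_flatMap_if]
  rw [hsplit, pvCombos_filter_all (PySem.List.pyRange 0 (L : Int)) (PySem.List.pyRange (L : Int) (maxlen : Int)) n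
    (by intro a ha
        have := PySem.List.mem_pyRange_one.mp ha
        simp; omega)
    (by intro a ha
        have := PySem.List.mem_pyRange_one.mp ha
        simp; omega)]

theorem pv_pyRange_nodup (L : Nat) : (PySem.List.pyRange 0 (L : Int)).Nodup := by
  rw [PySem.List.pyRange_zero_natCast]
  exact List.nodup_range.map (fun a b h => by omega)

-- A's two-branch dict update is exactly B's setdefault-and-add (modify) update
theorem pv_upd_eq (s x : String) (d : PySem.Dict String (PySem.Set String)) :
    (if d.contains x = false then d.insert x (PySem.Set.ofList [s])
     else d.modify x PySem.Set.empty (fun v => PySem.Set.add v s))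
      = d.modify x PySem.Set.empty (fun v => PySem.Set.add v s) := by
  by_cases h : d.contains x
  · simp [h]
  · simp only [eq_false_of_ne_true h]
    unfold PySem.Dict.modify
    rw [PySem.Dict.getD_of_not_contains d _ (eq_false_of_ne_true h)]
    rfl

theorem pv_step_eq (s : String) (maxlen n : Nat) (hL : s.toList.length ≤ maxlen)
    (alphabet : List String) (d : PySem.Dict String (PySem.Set String)) :
    (pvSubstitutionSet s (pvGenerateIdx maxlen n alphabet)).foldl (fun d x =>
        if d.contains x = false then d.insert x (PySem.Set.ofList [s])
        else d.modify x PySem.Set.empty (fun v => PySem.Set.add v s)) d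
      = (pvCombos n (PySem.List.pyRange 0 s.toList.length)).foldl (fun d positions =>
          (pvTuples alphabet n).foldl (fun d letters =>
            d.modify (pvMutLookup s.toList positions letters) PySem.Set.empty
              (fun v => PySem.Set.add v s)) d) d := by
  unfold pvSubstitutionSet
  rw [pv_filter_idx s.toList.length maxlen n hL alphabet]
  rw [List.map_flatMap]
  have hlists : ∀ c ∈ pvCombos n (PySem.List.pyRange 0 s.toList.length),
      ((pvTuples alphabet n).map (fun t => (c, t))).map (pvMutateString s)
        = (pvTuples alphabet n).map (fun t => pvMutLookup s.toList c t) := by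
    intro c hc
    rw [List.map_map]
    apply List.map_congr_left
    intro t ht
    obtain ⟨hsub, hclen⟩ := pvCombos_mem hc
    exact pv_mutate_eq s c t (by rw [hclen, pvTuples_mem ht]) (hsub.nodup (pv_pyRange_nodup _))
      (fun i hi => by
        have := PySem.List.mem_pyRange_one.mp (hsub.subset hi)
        omega)
  rw [List.flatMap_congr hlists]
  rw [List.foldl_flatMap]
  apply PySem.List.foldl_congr_mem
  intro acc c _
  rw [List.foldl_map]
  apply PySem.List.foldl_congr_mem
  intro acc2 t _
  exact pv_upd_eq s (pvMutLookup s.toList c t) acc2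

theorem pv_max?_le {xs : List Nat} {a : Nat} (ha : a ∈ xs) :
    a ≤ (PySem.List.max? xs (fun x => x)).getD 0 := by
  cases h : PySem.List.max? xs (fun x => x) with
  | none =>
    rw [PySem.List.max?_eq_none_iff] at h
    subst h; simp at ha
  | some m => simpa using PySem.List.max?_isMax h a ha

-- ===== VERDICT (by name: the statement is the Claim_ definition above) =====
set_option maxHeartbeats 1000000 in
theorem mutationhash_spec : Claim_equal_mutationhash := by
  intro strings nedit alphabet log _ hpre
  unfold Spec_mutationhash mutationhash mutationhash_alt
  dsimp only
  congr 1
  apply PySem.List.foldl_congr_mem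
  intro d s hs
  dsimp only
  exact pv_step_eq s _ nedit.toNat
    (pv_max?_le (show s.toList.length ∈ strings.map (fun s => s.toList.length) from
      List.mem_map_of_mem (f := fun s => s.toList.length) hs)) alphabet _
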